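-- pv_equiv track=rewrite | github.com/Mohammad-Ashhar/Daily-Practice-Questions | 2459-MinimumHoursOfTrainingToWinACompetition/2459-MinimumHoursOfTrainingToWinACompetition.py | minNumberOfHours
-- ===== SOURCE A (Python) =====
-- from typing import List
--
-- def minNumberOfHours(initialEnergy: int, initialExperience: int, energy: List[int], experience: List[int]) -> int:
--     min_hours = 0
--
--     sum_energy = sum(energy)
--     should_be_max = sum_energy + 1
--
--     if(should_be_max > initialEnergy):
--         min_hours += should_be_max - initialEnergy
--
--     index = 0
--     while(index < len(experience)):
--         if(initialExperience - experience[index] > 0):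
--             initialExperience += experience[index]
--             index += 1
--         else:
--             initialExperience += 1
--             min_hours += 1
--
--     return min_hours
-- ===== SOURCE B (Python) =====
-- from typing import List
--
-- def minNumberOfHours(initialEnergy: int, initialExperience: int, energy: List[int], experience: List[int]) -> int:
--     hours = max(0, sum(energy) + 1 - initialEnergy)
--     exp = initialExperience
--     for e in experience:
--         gap = e + 1 - exp
--         if gap > 0:
--             hours += gap
--             exp = e + 1
--         exp += e
--     return hours
-- ===== Notes on version B (the rewrite author's own statement) =====
-- stated objective: faster
-- what changed: Replaces A's one-hour-at-a-time training loop (which re-checks the same competitor while incrementing experience) with a single pass that adds the whole gap max(0, e+1-exp) per competitor in closed form.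
import Mathlib
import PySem

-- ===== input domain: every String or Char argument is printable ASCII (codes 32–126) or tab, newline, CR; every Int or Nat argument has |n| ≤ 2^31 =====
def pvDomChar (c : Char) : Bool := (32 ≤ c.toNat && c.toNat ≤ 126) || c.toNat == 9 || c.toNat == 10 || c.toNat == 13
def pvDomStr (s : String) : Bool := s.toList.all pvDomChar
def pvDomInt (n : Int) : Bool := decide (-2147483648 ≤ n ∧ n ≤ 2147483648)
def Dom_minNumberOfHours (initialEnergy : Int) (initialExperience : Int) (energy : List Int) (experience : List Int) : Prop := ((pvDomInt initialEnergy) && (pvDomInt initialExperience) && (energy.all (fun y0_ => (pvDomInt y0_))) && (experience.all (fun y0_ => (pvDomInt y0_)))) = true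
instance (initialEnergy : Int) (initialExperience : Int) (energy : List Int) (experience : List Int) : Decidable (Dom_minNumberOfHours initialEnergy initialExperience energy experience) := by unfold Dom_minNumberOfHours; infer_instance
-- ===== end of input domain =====

-- B replaces A's hour-by-hour experience training loop with a per-competitor closed-form gap sum (faster).
-- ===== PORT A =====
-- A's while loop: state (initialExperience, index, min_hours); the else branch trains one hour without advancing index.
def pyLoopA (experience : List Int) (initialExperience : Int) (index : Nat) (min_hours : Int) : Int :=
  if h : index < experience.length then
    if initialExperience - experience[index] > 0 then
      pyLoopA experience (initialExperience + experience[index]) (index + 1) min_hours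
    else
      pyLoopA experience (initialExperience + 1) index (min_hours + 1)
  else
    min_hours
termination_by (experience.length - index, (experience.getD index 0 + 1 - initialExperience).toNat)
decreasing_by
  · exact Prod.Lex.left _ _ (by omega)
  · exact Prod.Lex.right _ (by simp [List.getD_eq_getElem?_getD, List.getElem?_eq_getElem h]; omega)

def minNumberOfHours (initialEnergy : Int) (initialExperience : Int) (energy : List Int) (experience : List Int) : Int :=
  let min_hours : Int := 0
  let sum_energy := energy.sum
  let should_be_max := sum_energy + 1
  let min_hours := if should_be_max > initialEnergy then min_hours + (should_be_max - initialEnergy) else min_hours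
  pyLoopA experience initialExperience 0 min_hours

-- ===== PORT B =====
-- B's loop body: gap = e+1-exp; if gap > 0 add gap to hours and set exp = e+1; then exp += e.
def stepB (st : Int × Int) (e : Int) : Int × Int :=
  let exp := st.1
  let hours := st.2
  let gap := e + 1 - exp
  if gap > 0 then (e + 1 + e, hours + gap) else (exp + e, hours)

def minNumberOfHours_alt (initialEnergy : Int) (initialExperience : Int) (energy : List Int) (experience : List Int) : Int :=
  let hours := max 0 (energy.sum + 1 - initialEnergy)
  (experience.foldl stepB (initialExperience, hours)).2

-- ===== PRECONDITION & SPEC =====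
def Spec_minNumberOfHours (initialEnergy : Int) (initialExperience : Int) (energy : List Int) (experience : List Int) (out : Int) : Prop := out = minNumberOfHours_alt initialEnergy initialExperience energy experience
instance (initialEnergy : Int) (initialExperience : Int) (energy : List Int) (experience : List Int) (out : Int) : Decidable (Spec_minNumberOfHours initialEnergy initialExperience energy experience out) := by unfold Spec_minNumberOfHours; infer_instance

-- ===== CLAIM (what is proved, stated in full; the proofs are below) =====
def Claim_equal_minNumberOfHours : Prop := ∀ (initialEnergy : Int) (initialExperience : Int) (energy : List Int) (experience : List Int), Dom_minNumberOfHours initialEnergy initialExperience energy experience → Spec_minNumberOfHours initialEnergy initialExperience energy experience (minNumberOfHours initialEnergy initialExperience energy experience)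

-- ===== LEMMAS AND PROOFS =====

-- Training one hour (A's else branch) commutes with B's single closed-form step when exp ≤ e.
theorem stepB_shift (ie mh e : Int) (h : ie ≤ e) :
    stepB (ie + 1, mh + 1) e = stepB (ie, mh) e := by
  simp only [stepB]
  split_ifs with h1 h2 h2 <;> simp [Prod.ext_iff] <;> omega

-- A's while loop from position idx computes exactly B's fold over the remaining suffix.
theorem pyLoopA_eq_foldl (experience : List Int) (ie : Int) (idx : Nat) (mh : Int) :
    pyLoopA experience ie idx mh = ((experience.drop idx).foldl stepB (ie, mh)).2 := by
  fun_induction pyLoopA experience ie idx mh with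
  | case1 ie idx mh h hc ih =>
    rw [List.drop_eq_getElem_cons h, List.foldl_cons, ih]
    have : stepB (ie, mh) experience[idx] = (ie + experience[idx], mh) := by
      simp only [stepB]; rw [if_neg (by omega)]
    rw [this]
  | case2 ie idx mh h hc ih =>
    rw [ih, List.drop_eq_getElem_cons h, List.foldl_cons, List.foldl_cons,
        stepB_shift _ _ _ (by omega)]
  | case3 ie idx mh h =>
    rw [List.drop_eq_nil_iff.mpr (by omega)]; rfl

-- ===== VERDICT (by name: the statement is the Claim_ definition above) =====
theorem minNumberOfHours_spec : Claim_equal_minNumberOfHours := by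
  intro ie0 ix0 energy experience _
  show _ = _
  unfold minNumberOfHours minNumberOfHours_alt
  rw [pyLoopA_eq_foldl]
  simp only [List.drop_zero]
  have : (if energy.sum + 1 > ie0 then (0 : Int) + (energy.sum + 1 - ie0) else 0)
      = max 0 (energy.sum + 1 - ie0) := by omega
  rw [this]
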